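-- pv_equiv track=rewrite | github.com/mary-lev/concordances2.0 | controllers/xml.py | count_lines
-- ===== SOURCE A (Python) =====
-- def count_lines(content):
--     back = []
--     line_count = 0                   # get first word's id from allword base
--     for lines in content:
--         if lines in ['\n', '\r\n', '|'] or '|' in lines:
--             back.append(line_count)
--             line_count = 0
--         else:
--             line_count +=1
--     back.append(line_count)
--     return back
-- ===== SOURCE B (Python) =====
-- def count_lines(content):
--     def is_sep(line):
--         return line in ['\n', '\r\n', '|'] or '|' in line
--     seps = [i for i, line in enumerate(content) if is_sep(line)]
--     back = []
--     prev = -1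
--     for s in seps:
--         back.append(s - prev - 1)
--         prev = s
--     back.append(len(content) - prev - 1)
--     return back
-- ===== Notes on version B (the rewrite author's own statement) =====
-- stated objective: alternative
-- what changed: B first collects the indices of all separator lines, then computes the group sizes as gaps between consecutive separator positions (with -1 and len(content) as sentinels), instead of A's single pass with a resetting counter.
import Mathlib
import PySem

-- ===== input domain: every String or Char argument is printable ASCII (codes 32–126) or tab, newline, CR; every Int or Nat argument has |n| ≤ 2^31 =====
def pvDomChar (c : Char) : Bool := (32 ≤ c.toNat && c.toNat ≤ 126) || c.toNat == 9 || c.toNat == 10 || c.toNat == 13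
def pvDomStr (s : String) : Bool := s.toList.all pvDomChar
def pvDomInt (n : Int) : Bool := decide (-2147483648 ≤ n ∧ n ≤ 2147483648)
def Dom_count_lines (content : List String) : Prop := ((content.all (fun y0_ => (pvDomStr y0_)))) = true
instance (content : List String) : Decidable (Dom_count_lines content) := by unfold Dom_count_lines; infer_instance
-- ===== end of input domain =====

-- B computes group sizes from separator positions instead of A's resetting counter.

-- ===== PORT A =====
-- `lines in ['\n','\r\n','|'] or '|' in lines`
def is_sep_a (l : String) : Bool :=
  l == "\n" || l == "\r\n" || l == "|" || PySem.Str.isIn "|" l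

def count_lines (content : List String) : List Int :=
  let st := content.foldl
    (fun (s : List Int × Int) lines =>
      if is_sep_a lines then (s.1 ++ [s.2], 0) else (s.1, s.2 + 1))
    ([], 0)
  st.1 ++ [st.2]

-- ===== PORT B =====
def is_sep_b (line : String) : Bool :=
  line == "\n" || line == "\r\n" || line == "|" || PySem.Str.isIn "|" line

def count_lines_alt (content : List String) : List Int :=
  let seps : List Int :=
    ((PySem.List.enumerate content).filter (fun p => is_sep_b p.2)).map (fun p => p.1)
  let st := seps.foldl
    (fun (s : List Int × Int) x => (s.1 ++ [x - s.2 - 1], x)) ([], -1)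
  st.1 ++ [(content.length : Int) - st.2 - 1]

-- ===== PRECONDITION & SPEC =====
def Spec_count_lines (content : List String) (out : List Int) : Prop := out = count_lines_alt content
instance (content : List String) (out : List Int) : Decidable (Spec_count_lines content out) := by unfold Spec_count_lines; infer_instance

-- ===== CLAIM (what is proved, stated in full; the proofs are below) =====
def Claim_equal_count_lines : Prop := ∀ (content : List String), Dom_count_lines content → Spec_count_lines content (count_lines content)

-- ===== LEMMAS AND PROOFS =====

-- common spec: (head group size, remaining group sizes)
def gp : List String → Int × List Int
  | [] => (0, [])
  | l :: t => if is_sep_a l then (0, (gp t).1 :: (gp t).2) else ((gp t).1 + 1, (gp t).2)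

-- adjacent gaps of separator positions
def diffs : Int → List Int → Int → List Int
  | prev, [], n => [n - prev - 1]
  | prev, s :: ss, n => (s - prev - 1) :: diffs s ss n

theorem foldlA (t : List String) (back : List Int) (c : Int) :
    (t.foldl (fun (s : List Int × Int) lines =>
        if is_sep_a lines then (s.1 ++ [s.2], 0) else (s.1, s.2 + 1)) (back, c)).1
      ++ [(t.foldl (fun (s : List Int × Int) lines =>
        if is_sep_a lines then (s.1 ++ [s.2], 0) else (s.1, s.2 + 1)) (back, c)).2]
    = back ++ (c + (gp t).1) :: (gp t).2 := by
  induction t generalizing back c with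
  | nil => simp [gp]
  | cons l t ih =>
    by_cases h : is_sep_a l
    · simp [List.foldl_cons, h, gp, ih]
    · simp only [List.foldl_cons, h, gp, Bool.false_eq_true, ite_false, ih]
      ring_nf

theorem foldlB (ss : List Int) (back : List Int) (prev n : Int) :
    (ss.foldl (fun (s : List Int × Int) x => (s.1 ++ [x - s.2 - 1], x)) (back, prev)).1
      ++ [n - (ss.foldl (fun (s : List Int × Int) x => (s.1 ++ [x - s.2 - 1], x)) (back, prev)).2 - 1]
    = back ++ diffs prev ss n := by
  induction ss generalizing back prev with
  | nil => simp [diffs]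
  | cons s ss ih => simp [List.foldl_cons, diffs, ih]

theorem diffs_seps (t : List String) (k : Int) (prev : Int) :
    diffs prev
        (((PySem.List.enumerate t k).filter (fun p => is_sep_b p.2)).map (fun p => p.1))
        (k + t.length)
    = (k - prev - 1 + (gp t).1) :: (gp t).2 := by
  induction t generalizing k prev with
  | nil => simp [PySem.List.enumerate_nil, diffs, gp]
  | cons l t ih =>
    have hsep : is_sep_b l = is_sep_a l := rfl
    by_cases h : is_sep_a l
    · simp only [PySem.List.enumerate_cons, List.filter_cons, hsep, h, gp,
        List.length_cons]
      have := ih (k + 1) k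
      simp only [reduceIte, List.map_cons, diffs]
      push_cast
      rw [show (k + (↑t.length + 1) : Int) = (k + 1) + ↑t.length by ring, this]
      norm_num
    · simp only [PySem.List.enumerate_cons, List.filter_cons, hsep, h, gp,
        Bool.false_eq_true, ite_false, List.length_cons]
      have := ih (k + 1) prev
      push_cast
      rw [show (k + (↑t.length + 1) : Int) = (k + 1) + ↑t.length by ring, this]
      ring_nf

-- ===== VERDICT (by name: the statement is the Claim_ definition above) =====
theorem count_lines_spec : Claim_equal_count_lines := by
  intro content _
  show count_lines content = count_lines_alt content
  unfold count_lines count_lines_alt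
  simp only []
  rw [foldlA content [] 0, foldlB _ [] (-1) (content.length : Int)]
  have := diffs_seps content 0 (-1)
  simp only [zero_add] at this
  rw [this]
  norm_num
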